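-- pv_equiv track=rewrite | github.com/pedromonteiro01/IA | guiao-de-programacao-funcional-pedromonteiro01/aula1.py | junta_ordenado
-- ===== SOURCE A (Python) =====
-- def comprimento(lista):
--     if lista:
--         return 1 + comprimento(lista[1:])
--     return 0
--
-- def junta_ordenado(lista1, lista2):
--     if comprimento(lista1) == 0:
--         return lista2
--     elif comprimento(lista2) == 0:
--         return lista1
--     else:
--         lambda_sort = lambda x,y: [min(x,y),max(x,y)]
--         return lambda_sort(lista1[0], lista2[0]) + junta_ordenado(lista1[1:], lista2[1:])
-- ===== SOURCE B (Python) =====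
-- def junta_ordenado(lista1, lista2):
--     n = min(len(lista1), len(lista2))
--     resultado = []
--     for i in range(n):
--         resultado.append(min(lista1[i], lista2[i]))
--         resultado.append(max(lista1[i], lista2[i]))
--     return resultado + lista1[n:] + lista2[n:]
-- ===== Notes on version B (the rewrite author's own statement) =====
-- stated objective: faster
-- what changed: Replaces the recursive merge with its quadratic recursive comprimento length helper and repeated list slicing by a single indexed loop over the common prefix plus slice concatenation for the leftover suffixes.
import Mathlib
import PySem

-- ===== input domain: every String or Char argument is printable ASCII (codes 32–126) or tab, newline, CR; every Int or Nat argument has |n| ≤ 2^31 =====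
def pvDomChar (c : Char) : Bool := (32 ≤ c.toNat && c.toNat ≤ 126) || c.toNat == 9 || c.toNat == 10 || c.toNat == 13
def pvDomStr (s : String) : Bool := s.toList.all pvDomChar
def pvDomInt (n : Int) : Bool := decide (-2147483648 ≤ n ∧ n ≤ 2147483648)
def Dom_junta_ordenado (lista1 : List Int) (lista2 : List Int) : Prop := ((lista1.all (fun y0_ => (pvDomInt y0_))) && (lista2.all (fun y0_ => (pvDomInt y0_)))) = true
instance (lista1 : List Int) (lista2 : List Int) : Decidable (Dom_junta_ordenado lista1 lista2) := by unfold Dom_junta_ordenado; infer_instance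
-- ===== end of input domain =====

-- B replaces A's recursion (with its recursive length helper and per-call slicing) by one
-- indexed loop over the common prefix plus slice concatenation; objective: faster.

-- ===== PORT A =====
-- recursive length helper: 'if lista:' = nonempty match, 'lista[1:]' = the tail
def comprimento : List Int → Int
  | [] => 0
  | _ :: rest => 1 + comprimento rest

-- cited by junta_ordenado's decreasing_by (termination of A's recursion)
theorem comprimento_eq_length (l : List Int) : comprimento l = l.length := by
  induction l with
  | nil => rfl
  | cons a t ih => simp [comprimento, ih]; omega

-- lista[0] = headI (guards ensure nonempty), lista[1:] = tail (PySem.List.slice_from_one)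
def junta_ordenado (lista1 : List Int) (lista2 : List Int) : List Int :=
  if comprimento lista1 = 0 then lista2
  else if comprimento lista2 = 0 then lista1
  else [min lista1.headI lista2.headI, max lista1.headI lista2.headI]
        ++ junta_ordenado lista1.tail lista2.tail
termination_by lista1.length
decreasing_by
  have h1 := comprimento_eq_length lista1
  have : lista1.length ≠ 0 := by omega
  simp [List.length_tail]; omega

-- ===== PORT B =====
-- the 'for i in range(n)' loop with its two appends, as a counter loop
def jLoop (l1 l2 : List Int) (n i : Nat) (acc : List Int) : List Int :=
  if i < n then
    jLoop l1 l2 n (i + 1)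
      (acc ++ [min (PySem.List.pyGetD l1 (i : Int) 0) (PySem.List.pyGetD l2 (i : Int) 0),
               max (PySem.List.pyGetD l1 (i : Int) 0) (PySem.List.pyGetD l2 (i : Int) 0)])
  else acc
termination_by n - i

def junta_ordenado_alt (lista1 : List Int) (lista2 : List Int) : List Int :=
  let n := min lista1.length lista2.length
  let resultado := jLoop lista1 lista2 n 0 []
  resultado ++ PySem.List.slice lista1 (some (n : Int)) none
            ++ PySem.List.slice lista2 (some (n : Int)) none

-- ===== PRECONDITION & SPEC =====
def Spec_junta_ordenado (lista1 : List Int) (lista2 : List Int) (out : List Int) : Prop := out = junta_ordenado_alt lista1 lista2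
instance (lista1 : List Int) (lista2 : List Int) (out : List Int) : Decidable (Spec_junta_ordenado lista1 lista2 out) := by unfold Spec_junta_ordenado; infer_instance

-- ===== CLAIM (what is proved, stated in full; the proofs are below) =====
def Claim_equal_junta_ordenado : Prop := ∀ (lista1 : List Int) (lista2 : List Int), Dom_junta_ordenado lista1 lista2 → Spec_junta_ordenado lista1 lista2 (junta_ordenado lista1 lista2)

-- ===== LEMMAS AND PROOFS =====

-- common structural description of both ports
def mergeSpec : List Int → List Int → List Int
  | [], l2 => l2
  | l1, [] => l1
  | a :: t1, b :: t2 => min a b :: max a b :: mergeSpec t1 t2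

theorem junta_eq_mergeSpec (l1 l2 : List Int) : junta_ordenado l1 l2 = mergeSpec l1 l2 := by
  induction l1 generalizing l2 with
  | nil => cases l2 <;> simp [junta_ordenado, comprimento, mergeSpec]
  | cons a t1 ih =>
    have hne1 : ¬ comprimento (a :: t1) = 0 := by
      rw [comprimento_eq_length]; simp; omega
    cases l2 with
    | nil =>
      rw [junta_ordenado, if_neg hne1]
      simp [comprimento, mergeSpec]
    | cons b t2 =>
      have hne2 : ¬ comprimento (b :: t2) = 0 := by
        rw [comprimento_eq_length]; simp; omega
      rw [junta_ordenado, if_neg hne1, if_neg hne2]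
      simp [mergeSpec, ih]

theorem jLoop_stop (l1 l2 : List Int) (n i : Nat) (acc : List Int) (h : ¬ i < n) :
    jLoop l1 l2 n i acc = acc := by
  rw [jLoop]; exact if_neg h

theorem jLoop_step (l1 l2 : List Int) (n i : Nat) (acc : List Int) (h : i < n) :
    jLoop l1 l2 n i acc = jLoop l1 l2 n (i + 1)
      (acc ++ [min (PySem.List.pyGetD l1 (i : Int) 0) (PySem.List.pyGetD l2 (i : Int) 0),
               max (PySem.List.pyGetD l1 (i : Int) 0) (PySem.List.pyGetD l2 (i : Int) 0)]) := by
  rw [jLoop]; exact if_pos h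

theorem jLoop_acc (l1 l2 : List Int) (n i : Nat) (acc xs : List Int) :
    jLoop l1 l2 n i (acc ++ xs) = acc ++ jLoop l1 l2 n i xs := by
  induction h : n - i generalizing i xs with
  | zero => rw [jLoop_stop _ _ _ _ _ (by omega), jLoop_stop _ _ _ _ _ (by omega)]
  | succ k ih =>
    by_cases hlt : i < n
    · rw [jLoop_step _ _ _ _ _ hlt, jLoop_step _ _ _ _ _ hlt, List.append_assoc,
        ih (i + 1) _ (by omega)]
    · rw [jLoop_stop _ _ _ _ _ hlt, jLoop_stop _ _ _ _ _ hlt]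

theorem jLoop_shift (a b : Int) (t1 t2 : List Int) (n i : Nat) (acc : List Int) :
    jLoop (a :: t1) (b :: t2) (n + 1) (i + 1) acc = jLoop t1 t2 n i acc := by
  induction h : n - i generalizing i acc with
  | zero => rw [jLoop_stop _ _ _ _ _ (by omega), jLoop_stop _ _ _ _ _ (by omega)]
  | succ k ih =>
    by_cases hlt : i < n
    · rw [jLoop_step _ _ _ _ _ (by omega), jLoop_step _ _ _ _ _ hlt]
      simp only [PySem.List.pyGetD_natCast, List.getD_cons_succ]
      exact ih (i + 1) _ (by omega)
    · rw [jLoop_stop _ _ _ _ _ (by omega), jLoop_stop _ _ _ _ _ hlt]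

theorem alt_eq_mergeSpec (l1 l2 : List Int) : junta_ordenado_alt l1 l2 = mergeSpec l1 l2 := by
  induction l1 generalizing l2 with
  | nil =>
    cases l2 <;>
      simp [junta_ordenado_alt, jLoop_stop, mergeSpec]
  | cons a t1 ih =>
    cases l2 with
    | nil =>
      simp [junta_ordenado_alt, jLoop_stop, mergeSpec]
    | cons b t2 =>
      have hmin : min (a :: t1).length (b :: t2).length = min t1.length t2.length + 1 := by
        simp only [List.length_cons]; omega
      simp only [junta_ordenado_alt, hmin]
      rw [jLoop_step _ _ _ _ _ (by omega)]
      have g1 : PySem.List.pyGetD (a :: t1) ((0 : Nat) : Int) 0 = a := by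
        simp [PySem.List.pyGetD]
      have g2 : PySem.List.pyGetD (b :: t2) ((0 : Nat) : Int) 0 = b := by
        simp [PySem.List.pyGetD]
      rw [g1, g2, List.nil_append,
        show [min a b, max a b] = [min a b, max a b] ++ ([] : List Int) by simp,
        jLoop_acc, jLoop_shift]
      have hs1 : PySem.List.slice (a :: t1) (some ((min t1.length t2.length + 1 : Nat) : Int)) none
          = PySem.List.slice t1 (some ((min t1.length t2.length : Nat) : Int)) none := by
        rw [PySem.List.slice_from_natCast, PySem.List.slice_from_natCast]; rfl
      have hs2 : PySem.List.slice (b :: t2) (some ((min t1.length t2.length + 1 : Nat) : Int)) none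
          = PySem.List.slice t2 (some ((min t1.length t2.length : Nat) : Int)) none := by
        rw [PySem.List.slice_from_natCast, PySem.List.slice_from_natCast]; rfl
      rw [hs1, hs2]
      have ihb := ih t2
      simp only [junta_ordenado_alt] at ihb
      simp [mergeSpec, ← ihb]

-- ===== VERDICT (by name: the statement is the Claim_ definition above) =====
theorem junta_ordenado_spec : Claim_equal_junta_ordenado := by
  intro l1 l2 _
  unfold Spec_junta_ordenado
  rw [junta_eq_mergeSpec, alt_eq_mergeSpec]
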